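-- pv_equiv track=rewrite | github.com/AmanNiyad/Codes | PYTHON/Hackerrank/library_fine.py | libraryFine
-- ===== SOURCE A (Python) =====
-- count=[31, 28, 31, 30, 31, 30, 31,31,30,31,30,31]
--
-- def libraryFine(d1, m1, y1, d2, m2, y2):
--     year=[y1,y2]
--     lp={}
--     lp[0]=0
--     lp[1]=0
--     for i in range(2):
--         for j in range(year[i]):
--             if(j%100!=0):
--                 if(j%4==0):
--                     lp[i]+=1
--             else:
--                 if(j%400==0):
--                     lp[i]+=1
--     x1=y1*365+sum(count[0:m1])+d1+lp[0]
--     x2=y2*365+sum(count[0:m2])+d2+lp[1]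
--     days=x1-x2
--
--     if(days<0):
--         return 0
--     elif(m1==m2 and y1==y2):
--         return days*15
--     elif(y1==y2):
--         return 500*(m1-m2)
--     else:
--         return 10000
-- ===== SOURCE B (Python) =====
-- # B: closed-form leap-year count ((y+3)//4 - (y+99)//100 + (y+399)//400)
-- # instead of A's O(year) per-year counting loops.
--
-- count = [31, 28, 31, 30, 31, 30, 31, 31, 30, 31, 30, 31]
--
-- def _leaps(y):
--     # number of leap years among 0, 1, ..., y-1
--     if y <= 0:
--         return 0
--     return (y + 3) // 4 - (y + 99) // 100 + (y + 399) // 400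
--
-- def libraryFine(d1, m1, y1, d2, m2, y2):
--     x1 = y1 * 365 + sum(count[:m1]) + d1 + _leaps(y1)
--     x2 = y2 * 365 + sum(count[:m2]) + d2 + _leaps(y2)
--     days = x1 - x2
--     if days < 0:
--         return 0
--     if y1 == y2 and m1 == m2:
--         return days * 15
--     if y1 == y2:
--         return 500 * (m1 - m2)
--     return 10000
-- ===== Notes on version B (the rewrite author's own statement) =====
-- stated objective: faster
-- what changed: Replaced A's per-year counting loops over a dict (iterating j from 0 to y for each year) with the closed-form leap count (y+3)//4-(y+99)//100+(y+399)//400.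
import Mathlib
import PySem

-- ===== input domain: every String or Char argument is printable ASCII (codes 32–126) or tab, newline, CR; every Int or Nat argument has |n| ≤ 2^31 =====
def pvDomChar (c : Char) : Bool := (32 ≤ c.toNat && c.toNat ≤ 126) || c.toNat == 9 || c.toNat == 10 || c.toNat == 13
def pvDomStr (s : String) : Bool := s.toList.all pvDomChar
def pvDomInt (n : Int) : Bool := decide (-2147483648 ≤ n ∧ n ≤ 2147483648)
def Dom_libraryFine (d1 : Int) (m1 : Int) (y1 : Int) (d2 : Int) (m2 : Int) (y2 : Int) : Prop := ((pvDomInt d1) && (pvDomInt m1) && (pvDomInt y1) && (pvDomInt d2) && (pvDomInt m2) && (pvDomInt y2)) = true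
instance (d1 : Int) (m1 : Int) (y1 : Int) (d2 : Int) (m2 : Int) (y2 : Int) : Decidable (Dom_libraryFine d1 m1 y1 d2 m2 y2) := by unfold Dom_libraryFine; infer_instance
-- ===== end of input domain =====

-- B replaces A's O(year) leap-year counting loops by the closed-form count
-- (y+3)//4 - (y+99)//100 + (y+399)//400 (objective: faster).

-- ===== PORT A =====
def libraryFine (d1 : Int) (m1 : Int) (y1 : Int) (d2 : Int) (m2 : Int) (y2 : Int) : Int :=
  let count : List Int := [31, 28, 31, 30, 31, 30, 31, 31, 30, 31, 30, 31]
  let year : List Int := [y1, y2]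
  let lp : PySem.Dict Int Int := (PySem.Dict.empty.insert 0 0).insert 1 0
  -- year[i] with i ∈ range(2) always in range, so pyGetD is exact here;
  -- lp[i] += 1 with keys 0,1 always present, so Dict.modify is exact here
  let lp := (PySem.List.pyRange 0 2 1).foldl (fun lp i =>
      (PySem.List.pyRange 0 (PySem.List.pyGetD year i 0) 1).foldl (fun lp j =>
        if PySem.Int.mod j 100 ≠ 0 then
          (if PySem.Int.mod j 4 = 0 then lp.modify i 0 (· + 1) else lp)
        else
          (if PySem.Int.mod j 400 = 0 then lp.modify i 0 (· + 1) else lp)) lp) lp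
  let x1 := y1 * 365 + (PySem.List.slice count (some 0) (some m1)).sum + d1 + lp.getD 0 0
  let x2 := y2 * 365 + (PySem.List.slice count (some 0) (some m2)).sum + d2 + lp.getD 1 0
  let days := x1 - x2
  if days < 0 then 0
  else if m1 = m2 ∧ y1 = y2 then days * 15
  else if y1 = y2 then 500 * (m1 - m2)
  else 10000

-- ===== PORT B =====
def pvCount : List Int := [31, 28, 31, 30, 31, 30, 31, 31, 30, 31, 30, 31]

def pvLeaps (y : Int) : Int :=
  if y ≤ 0 then 0
  else PySem.Int.floordiv (y + 3) 4 - PySem.Int.floordiv (y + 99) 100 + PySem.Int.floordiv (y + 399) 400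

def libraryFine_alt (d1 : Int) (m1 : Int) (y1 : Int) (d2 : Int) (m2 : Int) (y2 : Int) : Int :=
  let x1 := y1 * 365 + (PySem.List.slice pvCount none (some m1)).sum + d1 + pvLeaps y1
  let x2 := y2 * 365 + (PySem.List.slice pvCount none (some m2)).sum + d2 + pvLeaps y2
  let days := x1 - x2
  if days < 0 then 0
  else if y1 = y2 ∧ m1 = m2 then days * 15
  else if y1 = y2 then 500 * (m1 - m2)
  else 10000

-- ===== PRECONDITION & SPEC =====
def Spec_libraryFine (d1 : Int) (m1 : Int) (y1 : Int) (d2 : Int) (m2 : Int) (y2 : Int) (out : Int) : Prop := out = libraryFine_alt d1 m1 y1 d2 m2 y2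
instance (d1 : Int) (m1 : Int) (y1 : Int) (d2 : Int) (m2 : Int) (y2 : Int) (out : Int) : Decidable (Spec_libraryFine d1 m1 y1 d2 m2 y2 out) := by unfold Spec_libraryFine; infer_instance

-- ===== CLAIM (what is proved, stated in full; the proofs are below) =====
def Claim_equal_libraryFine : Prop := ∀ (d1 : Int) (m1 : Int) (y1 : Int) (d2 : Int) (m2 : Int) (y2 : Int), Dom_libraryFine d1 m1 y1 d2 m2 y2 → Spec_libraryFine d1 m1 y1 d2 m2 y2 (libraryFine d1 m1 y1 d2 m2 y2)

-- ===== LEMMAS AND PROOFS =====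

-- the closed form without the sign guard, on naturals
lemma pv_leaps_nat (n : Nat) :
    pvLeaps (n : Int) =
      ((n : Int) + 3) / 4 - ((n : Int) + 99) / 100 + ((n : Int) + 399) / 400 := by
  unfold pvLeaps
  rw [PySem.Int.floordiv_eq_ediv_of_pos (a := (n : Int) + 3) (b := 4) (by omega),
      PySem.Int.floordiv_eq_ediv_of_pos (a := (n : Int) + 99) (b := 100) (by omega),
      PySem.Int.floordiv_eq_ediv_of_pos (a := (n : Int) + 399) (b := 400) (by omega)]
  split_ifs <;> omega

-- one leap step of the closed form
lemma pv_leaps_succ (n : Nat) :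
    pvLeaps ((n : Int) + 1) =
      pvLeaps (n : Int) +
        (if PySem.Int.mod (n : Int) 100 ≠ 0 then
           (if PySem.Int.mod (n : Int) 4 = 0 then 1 else 0)
         else (if PySem.Int.mod (n : Int) 400 = 0 then 1 else 0)) := by
  have h1 : ((n : Int) + 1) = (((n + 1 : Nat) : Nat) : Int) := by push_cast; ring
  rw [h1, pv_leaps_nat (n + 1), pv_leaps_nat n,
      PySem.Int.mod_eq_emod_of_pos (a := (n : Int)) (b := 100) (by omega),
      PySem.Int.mod_eq_emod_of_pos (a := (n : Int)) (b := 4) (by omega),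
      PySem.Int.mod_eq_emod_of_pos (a := (n : Int)) (b := 400) (by omega)]
  push_cast
  split_ifs <;> omega

-- A's inner counting loop over range(n) adds the closed-form leap count to key k.
lemma pv_loop_nat (k : Int) (n : Nat) (d : PySem.Dict Int Int) (k' : Int) :
    ((PySem.List.pyRange 0 (n : Int) 1).foldl (fun lp j =>
        if PySem.Int.mod j 100 ≠ 0 then
          (if PySem.Int.mod j 4 = 0 then lp.modify k 0 (· + 1) else lp)
        else
          (if PySem.Int.mod j 400 = 0 then lp.modify k 0 (· + 1) else lp)) d).getD k' 0
      = d.getD k' 0 + (if k' = k then pvLeaps (n : Int) else 0) := by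
  induction n generalizing d k' with
  | zero => simp [PySem.List.pyRange_one_eq_nil, pvLeaps]
  | succ n ih =>
    rw [show (((n : Nat) + 1 : Nat) : Int) = (n : Int) + 1 from by push_cast; ring,
        PySem.List.pyRange_one_succ_right (by omega), List.foldl_append]
    simp only [List.foldl_cons, List.foldl_nil]
    rw [pv_leaps_succ]
    split_ifs with hc1 hc2 hc3 <;>
      simp only [PySem.Dict.getD_modify, ih] <;> split_ifs <;> subst_vars <;> omega

lemma pv_loop (y : Int) (k k' : Int) (d : PySem.Dict Int Int) :
    ((PySem.List.pyRange 0 y 1).foldl (fun lp j =>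
        if PySem.Int.mod j 100 ≠ 0 then
          (if PySem.Int.mod j 4 = 0 then lp.modify k 0 (· + 1) else lp)
        else
          (if PySem.Int.mod j 400 = 0 then lp.modify k 0 (· + 1) else lp)) d).getD k' 0
      = d.getD k' 0 + (if k' = k then pvLeaps y else 0) := by
  by_cases hy : y ≤ 0
  · rw [PySem.List.pyRange_one_eq_nil hy]
    simp [pvLeaps, hy]
  · have h : y = ((y.toNat : Nat) : Int) := by omega
    rw [h, pv_loop_nat]

-- ===== VERDICT (by name: the statement is the Claim_ definition above) =====
theorem libraryFine_spec : Claim_equal_libraryFine := by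
  intro d1 m1 y1 d2 m2 y2 _
  unfold Spec_libraryFine libraryFine libraryFine_alt
  rw [show PySem.List.pyRange 0 2 1 = [0, 1] from rfl]
  simp only [List.foldl_cons, List.foldl_nil]
  rw [show PySem.List.pyGetD [y1, y2] 0 0 = y1 from rfl,
      show PySem.List.pyGetD [y1, y2] 1 0 = y2 from rfl,
      pv_loop y2 1 0, pv_loop y1 0 0, pv_loop y2 1 1, pv_loop y1 0 1]
  rw [show ((PySem.Dict.empty.insert (0 : Int) (0 : Int)).insert 1 0).getD 0 0 = 0 from rfl,
      show ((PySem.Dict.empty.insert (0 : Int) (0 : Int)).insert 1 0).getD 1 0 = 0 from rfl]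
  simp only [PySem.List.slice_zero_start, pvCount]
  norm_num
  split_ifs <;> omega
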